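-- pv_equiv track=rewrite | github.com/CSL-KU/drama-pp | re/gf2_bank_solver.py | matmul_gf2
-- ===== SOURCE A (Python) =====
-- from typing import Dict, List, Optional, Sequence, Tuple
--
-- def matmul_gf2(left: List[List[int]], right: List[List[int]]) -> List[List[int]]:
--     if not left or not right:
--         return []
--     n_inner = len(left[0])
--     if n_inner != len(right):
--         raise ValueError('GF(2) matrix dimensions do not align')
--     out_cols = len(right[0])
--     result = [[0] * out_cols for _ in range(len(left))]
--     for row_idx, row in enumerate(left):
--         one_positions = [idx for idx, bit in enumerate(row) if bit]
--         for out_col in range(out_cols):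
--             accum = 0
--             for pos in one_positions:
--                 accum ^= right[pos][out_col]
--             result[row_idx][out_col] = accum
--     return result
-- ===== SOURCE B (Python) =====
-- def matmul_gf2(left, right):
--     if not left or not right:
--         return []
--     if len(left[0]) != len(right):
--         raise ValueError('GF(2) matrix dimensions do not align')
--     out_cols = len(right[0])
--     result = []
--     for row in left:
--         acc = [0] * out_cols
--         for bit, rrow in zip(row, right):
--             if bit:
--                 acc = [a ^ b for a, b in zip(acc, rrow)]
--         result.append(acc)
--     return result
-- ===== Notes on version B (the rewrite author's own statement) =====
-- stated objective: alternative
-- what changed: A precomputes the list of one-positions per left row and then, for each output column, scans that index list XOR-ing single entries right[pos][col]; B drops the index list and the per-column scans entirely and instead folds once over zip(row, right), XOR-ing whole rows of right componentwise into a row accumulator.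
import Mathlib
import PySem

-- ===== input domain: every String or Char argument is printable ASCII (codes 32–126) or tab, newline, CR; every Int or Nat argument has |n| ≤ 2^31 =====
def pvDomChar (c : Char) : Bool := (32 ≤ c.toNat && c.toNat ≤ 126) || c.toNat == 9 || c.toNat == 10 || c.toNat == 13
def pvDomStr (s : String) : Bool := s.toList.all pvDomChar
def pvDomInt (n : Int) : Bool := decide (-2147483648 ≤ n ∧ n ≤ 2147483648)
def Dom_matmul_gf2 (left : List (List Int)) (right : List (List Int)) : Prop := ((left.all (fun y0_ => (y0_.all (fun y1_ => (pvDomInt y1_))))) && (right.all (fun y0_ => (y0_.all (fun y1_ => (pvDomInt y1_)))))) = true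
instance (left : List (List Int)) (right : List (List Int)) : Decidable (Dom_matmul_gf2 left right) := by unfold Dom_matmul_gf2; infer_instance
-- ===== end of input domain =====

-- B replaces A's per-column inner scans over the one-positions index list by a single
-- row-wise accumulation that XORs whole rows of `right` (alternative decomposition).

-- ===== PORT A =====
-- literal port of A: build one_positions per row, then for each output column fold XOR
-- over right[pos][col]; the ValueError branch (dimension mismatch) returns [] here and
-- is excluded by Pre_; out-of-range indexing (IndexError) is ported with pyGetD and
-- likewise excluded by Pre_.
def matmul_gf2 (left : List (List Int)) (right : List (List Int)) : List (List Int) :=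
  if left = [] ∨ right = [] then [] else
  if ((left.headD []).length : Int) ≠ (right.length : Int) then [] else
  left.map (fun row =>
    (PySem.List.pyRange 0 (((right.headD []).length : Nat) : Int) 1).map (fun c =>
      ((PySem.List.enumerate row 0).filterMap
        (fun p => if p.2 ≠ 0 then some p.1 else none)).foldl
        (fun accum pos =>
          PySem.Int.bxor accum (PySem.List.pyGetD (PySem.List.pyGetD right pos []) c 0)) 0))

-- ===== PORT B =====
-- literal port of Source B: for each left row, fold over zip(row, right) accumulating the
-- componentwise XOR of the selected rows of `right`, appending each finished row.
def matmul_gf2_alt (left : List (List Int)) (right : List (List Int)) : List (List Int) :=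
  if left = [] ∨ right = [] then [] else
  if ((left.headD []).length : Int) ≠ (right.length : Int) then [] else
  left.foldl
    (fun result row =>
      result ++
        [(List.zip row right).foldl
          (fun acc p =>
            if p.1 ≠ 0 then (List.zip acc p.2).map (fun q => PySem.Int.bxor q.1 q.2) else acc)
          (List.replicate (right.headD []).length 0)])
    []

-- ===== PRECONDITION & SPEC =====
-- Pre_ excludes exactly the inputs where A raises: a ValueError when len(left[0]) ≠ len(right)
-- (both nonempty), and an IndexError when some truthy left entry indexes past right or into a
-- right row shorter than len(right[0]) (only reachable when len(right[0]) > 0).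
def Pre_matmul_gf2 (left : List (List Int)) (right : List (List Int)) : Prop :=
  left = [] ∨ right = [] ∨
  ((left.headD []).length = right.length ∧
   ((right.headD []).length = 0 ∨
    ∀ row ∈ left, ∀ p ∈ PySem.List.enumerate row 0, p.2 ≠ 0 →
      p.1 < (right.length : Int) ∧
      (right.headD []).length ≤ (PySem.List.pyGetD right p.1 []).length))
instance (left : List (List Int)) (right : List (List Int)) : Decidable (Pre_matmul_gf2 left right) := by unfold Pre_matmul_gf2; infer_instance

def pvWitness_matmul_gf2 : List (List Int) × List (List Int) :=
  ([[1, 0, 1], [0, 1, 1]], [[1, 1], [0, 1], [1, 0]])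

def Spec_matmul_gf2 (left : List (List Int)) (right : List (List Int)) (out : List (List Int)) : Prop := out = matmul_gf2_alt left right
instance (left : List (List Int)) (right : List (List Int)) (out : List (List Int)) : Decidable (Spec_matmul_gf2 left right out) := by unfold Spec_matmul_gf2; infer_instance

-- ===== CLAIM (what is proved, stated in full; the proofs are below) =====
def Claim_equal_matmul_gf2 : Prop := ∀ (left : List (List Int)) (right : List (List Int)), Dom_matmul_gf2 left right → Pre_matmul_gf2 left right → Spec_matmul_gf2 left right (matmul_gf2 left right)

-- ===== LEMMAS AND PROOFS =====

-- B's step keeps an empty accumulator empty (the out_cols = 0 case).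
lemma bfold_nil_acc (pairs : List (Int × List Int)) :
    pairs.foldl
      (fun acc p =>
        if p.1 ≠ 0 then (List.zip acc p.2).map (fun q => PySem.Int.bxor q.1 q.2) else acc)
      ([] : List Int) = [] := by
  induction pairs with
  | nil => rfl
  | cons p ps ih => simpa [List.foldl_cons] using ih

-- A's index-based inner fold equals a fold over zip(row, rs.drop n), provided every truthy
-- index stays inside rs.
lemma afold_eq_zipfold (c : Int) :
    ∀ (row : List Int) (rs : List (List Int)) (n : Nat) (a : Int),
      (∀ p ∈ PySem.List.enumerate row (n : Int), p.2 ≠ 0 → p.1 < (rs.length : Int)) →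
      ((PySem.List.enumerate row (n : Int)).filterMap
        (fun p => if p.2 ≠ 0 then some p.1 else none)).foldl
        (fun accum pos =>
          PySem.Int.bxor accum (PySem.List.pyGetD (PySem.List.pyGetD rs pos []) c 0)) a
      = (List.zip row (rs.drop n)).foldl
          (fun accum p =>
            if p.1 ≠ 0 then PySem.Int.bxor accum (PySem.List.pyGetD p.2 c 0) else accum) a := by
  intro row
  induction row with
  | nil => intro rs n a _; simp [PySem.List.enumerate_nil]
  | cons x row ih =>
    intro rs n a h
    rw [PySem.List.enumerate_cons] at h ⊢
    have h' : ∀ p ∈ PySem.List.enumerate row ((n : Int) + 1), p.2 ≠ 0 → p.1 < (rs.length : Int) := by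
      intro p hp hpz; exact h p (List.mem_cons_of_mem _ hp) hpz
    have hsucc : ((n : Int) + 1) = ((n + 1 : Nat) : Int) := by push_cast; ring
    by_cases hx : x = 0
    · have hfm : List.filterMap (fun p => if p.2 ≠ 0 then some p.1 else none)
          (((n : Int), x) :: PySem.List.enumerate row ((n : Int) + 1))
          = List.filterMap (fun p => if p.2 ≠ 0 then some p.1 else none)
              (PySem.List.enumerate row ((n : Int) + 1)) := by
        simp [hx]
      rw [hfm]
      rcases hdrop : rs.drop n with _ | ⟨y, ys⟩
      · -- rs.drop n = [], hence rs.length ≤ n and no truthy index exists in row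
        have hlen : rs.length ≤ n := by
          by_contra hlt
          push Not at hlt
          have := List.drop_eq_nil_iff.mp hdrop
          omega
        have hempty : (PySem.List.enumerate row ((n : Int) + 1)).filterMap
            (fun p => if p.2 ≠ 0 then some p.1 else none) = [] := by
          rw [List.filterMap_eq_nil_iff]
          intro p hp
          rcases (PySem.List.mem_enumerate_iff _ _ _).mp hp with ⟨k, hk, rfl⟩
          by_cases hpz : row[k] = 0
          · simp [hpz]
          · exfalso
            have := h' (((n : Int) + 1 + k, row[k]))
              ((PySem.List.mem_enumerate_iff _ _ _).mpr ⟨k, hk, rfl⟩) hpz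
            simp only at this
            omega
        rw [hempty]
        simp
      · have hstep : (List.zip (x :: row) (y :: ys)).foldl
            (fun accum p =>
              if p.1 ≠ 0 then PySem.Int.bxor accum (PySem.List.pyGetD p.2 c 0) else accum) a
            = (List.zip row ys).foldl
                (fun accum p =>
                  if p.1 ≠ 0 then PySem.Int.bxor accum (PySem.List.pyGetD p.2 c 0) else accum) a := by
          simp only [List.zip_cons_cons, List.foldl_cons]
          rw [if_neg (not_ne_iff.mpr hx)]
        rw [hstep]
        have hdrop1 : rs.drop (n + 1) = ys := by
          have h1 : rs.drop (n + 1) = (rs.drop n).drop 1 := by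
            rw [List.drop_drop]
          rw [h1, hdrop]; rfl
        rw [hsucc] at h'
        have := ih rs (n + 1) a h'
        rw [hsucc, this, hdrop1]
    · have hfm : List.filterMap (fun p => if p.2 ≠ 0 then some p.1 else none)
          (((n : Int), x) :: PySem.List.enumerate row ((n : Int) + 1))
          = (n : Int) :: List.filterMap (fun p => if p.2 ≠ 0 then some p.1 else none)
              (PySem.List.enumerate row ((n : Int) + 1)) := by
        simp [hx]
      rw [hfm]
      have hn : (n : Int) < (rs.length : Int) := h ((n : Int), x) (List.mem_cons_self) hx
      have hnlt : n < rs.length := by exact_mod_cast hn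
      have hcons : rs.drop n = rs[n] :: rs.drop (n + 1) := List.drop_eq_getElem_cons hnlt
      have hget : PySem.List.pyGetD rs (n : Int) [] = rs[n] := by
        rw [PySem.List.pyGetD_natCast]
        exact List.getD_eq_getElem _ _ hnlt
      rw [hcons]
      simp only [List.foldl_cons, List.zip_cons_cons]
      rw [if_pos hx, hget]
      rw [hsucc] at h'
      have := ih rs (n + 1) (PySem.Int.bxor a (PySem.List.pyGetD rs[n] c 0)) h'
      rw [hsucc, this]

-- every list equals the map of its getD over its index range
lemma map_range_getD (l : List Int) : (List.range l.length).map (fun c => l.getD c 0) = l := by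
  apply List.ext_getElem
  · simp
  · intro i h1 h2
    simp [List.getD_eq_getElem?_getD, List.getElem?_eq_getElem h2]

-- B's vector fold computes, per column, the scalar fold A computes (after index elimination).
lemma bfold_eq_map_range :
    ∀ (pairs : List (Int × List Int)) (acc : List Int),
      (∀ p ∈ pairs, p.1 ≠ 0 → acc.length ≤ p.2.length) →
      pairs.foldl
        (fun acc p =>
          if p.1 ≠ 0 then (List.zip acc p.2).map (fun q => PySem.Int.bxor q.1 q.2) else acc)
        acc
      = (List.range acc.length).map (fun (c : Nat) =>
          pairs.foldl
            (fun a p => if p.1 ≠ 0 then PySem.Int.bxor a (PySem.List.pyGetD p.2 ((c : Nat) : Int) 0) else a)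
            (acc.getD c 0)) := by
  intro pairs
  induction pairs with
  | nil =>
    intro acc _
    simp only [List.foldl_nil]
    exact (map_range_getD acc).symm
  | cons p ps ih =>
    intro acc h
    by_cases hp : p.1 = 0
    · simp only [List.foldl_cons, hp, ne_eq, not_true_eq_false, if_false]
      exact ih acc (fun q hq => h q (List.mem_cons_of_mem _ hq))
    · have hlen : acc.length ≤ p.2.length := h p (List.mem_cons_self) hp
      simp only [List.foldl_cons, hp, ne_eq, not_false_eq_true, if_true]
      set acc' := (List.zip acc p.2).map (fun q => PySem.Int.bxor q.1 q.2) with hacc'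
      have hlen' : acc'.length = acc.length := by
        simp [hacc', List.length_zip]; omega
      have h' : ∀ q ∈ ps, q.1 ≠ 0 → acc'.length ≤ q.2.length := by
        intro q hq hqz
        rw [hlen']
        exact h q (List.mem_cons_of_mem _ hq) hqz
      rw [ih acc' h', hlen']
      apply List.map_congr_left
      intro c hc
      have hclt : c < acc.length := List.mem_range.mp hc
      have hget : acc'.getD c 0 = PySem.Int.bxor (acc.getD c 0) (PySem.List.pyGetD p.2 (c : Int) 0) := by
        have hc2 : c < p.2.length := lt_of_lt_of_le hclt hlen
        have hczip : c < (List.zip acc p.2).length := by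
          simp [List.length_zip]; omega
        rw [hacc']
        rw [List.getD_eq_getElem _ _ (by simpa using hczip)]
        simp only [List.getElem_map, List.getElem_zip]
        rw [List.getD_eq_getElem _ _ hclt, PySem.List.pyGetD_natCast,
          List.getD_eq_getElem _ _ hc2]
      simp only [ne_eq, hget]

-- ===== VERDICT (by name: the statement is the Claim_ definition above) =====
theorem matmul_gf2_spec : Claim_equal_matmul_gf2 := by
  intro left right _ hpre
  unfold Spec_matmul_gf2 matmul_gf2 matmul_gf2_alt
  by_cases hemp : left = [] ∨ right = []
  · simp [hemp]
  · rw [if_neg hemp, if_neg hemp]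
    push Not at hemp
    rcases hpre with h | h | ⟨hdim, hrest⟩
    · exact absurd h hemp.1
    · exact absurd h hemp.2
    · have hdim' : ¬ ((left.headD []).length : Int) ≠ (right.length : Int) := by
        rw [not_ne_iff]; exact_mod_cast hdim
      rw [if_neg hdim', if_neg hdim']
      rw [PySem.List.foldl_append_singleton_eq_map, List.nil_append]
      apply List.map_congr_left
      intro row hrow
      rcases hrest with houtz | hfor
      · rw [houtz]
        rw [PySem.List.pyRange_one_eq_nil (by simp), List.map_nil, List.replicate_zero]
        exact (bfold_nil_acc _).symm
      · have hyp2 : ∀ p ∈ List.zip row right, p.1 ≠ 0 →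
            (List.replicate (right.headD []).length (0 : Int)).length ≤ p.2.length := by
          intro p hp hpz
          rcases List.mem_iff_getElem.mp hp with ⟨k, hk, hpk⟩
          have hk1 : k < row.length := by rw [List.length_zip] at hk; omega
          have hk2 : k < right.length := by rw [List.length_zip] at hk; omega
          have hpk' : p = (row[k], right[k]) := by
            rw [← hpk]; exact List.getElem_zip
          have hz : row[k] ≠ 0 := by
            rw [hpk'] at hpz; simpa using hpz
          obtain ⟨h1, h2⟩ := hfor row hrow ((k : Int), row[k])
            ((PySem.List.mem_enumerate_iff _ _ _).mpr ⟨k, hk1, by simp⟩) hz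
          have hgetk : PySem.List.pyGetD right ((k : Nat) : Int) [] = right[k] := by
            rw [PySem.List.pyGetD_natCast]
            exact List.getD_eq_getElem _ _ hk2
          rw [List.length_replicate, hpk']
          simpa [hgetk] using h2
        rw [bfold_eq_map_range _ _ hyp2, List.length_replicate]
        rw [PySem.List.pyRange_zero_natCast, List.map_map]
        apply List.map_congr_left
        intro c hc
        have hcl : c < (right.headD []).length := List.mem_range.mp hc
        simp only [Function.comp]
        rw [List.getD_replicate _ hcl]
        have hyp1 : ∀ p ∈ PySem.List.enumerate row (((0 : Nat) : Int)), p.2 ≠ 0 →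
            p.1 < (right.length : Int) := by
          intro p hp hpz
          exact (hfor row hrow p (by simpa using hp) hpz).1
        have key := afold_eq_zipfold ((c : Nat) : Int) row right 0 0 hyp1
        simpa using key
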